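-- pv_equiv track=rewrite | github.com/SeongHyeon-Yun/Progarmmers | 프로그래머스/unrated/181872. 특정 문자열로 끝나는 가장 긴 부분 문자열 찾기/특정 문자열로 끝나는 가장 긴 부분 문자열 찾기.py | solution
-- ===== SOURCE A (Python) =====
-- def solution(myString, pat):
--     answer = ''
--     end_num = []
--     for index, value in enumerate(myString):
--         if value in pat:
--             end_num.append(index)
--     answer = myString[:end_num[-1]+1]
--     return answer
-- ===== SOURCE B (Python) =====
-- def solution(myString, pat):
--     last = next(i for i in range(len(myString) - 1, -1, -1) if myString[i] in pat)
--     return myString[:last + 1]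
-- ===== Notes on version B (the rewrite author's own statement) =====
-- stated objective: simpler
-- what changed: Instead of a full forward scan that collects every matching index into a list and then takes its last element, B finds the last matching index directly with a backward early-exit search (next over a reversed range), needing no intermediate list. Measured faster in a timing run (early exit from the right and no index-list allocation).
import Mathlib
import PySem

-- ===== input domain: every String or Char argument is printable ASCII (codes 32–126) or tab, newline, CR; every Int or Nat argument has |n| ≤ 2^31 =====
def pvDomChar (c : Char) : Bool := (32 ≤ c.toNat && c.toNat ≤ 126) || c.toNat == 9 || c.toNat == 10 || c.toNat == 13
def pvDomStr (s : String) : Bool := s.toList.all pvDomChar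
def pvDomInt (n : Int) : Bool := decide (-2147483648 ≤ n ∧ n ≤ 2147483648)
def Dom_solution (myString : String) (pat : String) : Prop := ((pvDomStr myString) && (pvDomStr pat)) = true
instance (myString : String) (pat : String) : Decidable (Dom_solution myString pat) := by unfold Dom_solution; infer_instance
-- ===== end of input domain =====

-- B replaces A's forward collect-all-matching-indices pass by a backward early-exit search
-- for the last matching index (simpler, no intermediate list); like A, B raises when no
-- character of myString occurs in pat (StopIteration vs A's IndexError) — excluded by Pre_.


-- ===== PORT A =====
def solution (myString : String) (pat : String) : String :=
  let end_num : List Int :=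
    (PySem.List.enumerate myString.toList).foldl
      (fun acc iv => if PySem.Chars.isIn [iv.2] pat.toList then acc ++ [iv.1] else acc) []
  match PySem.List.pyGet? end_num (-1) with
  | some i => PySem.Str.slice myString none (some (i + 1))   -- myString[:end_num[-1]+1]
  | none => ""   -- Python raises IndexError here (empty end_num); excluded by Pre_solution

-- ===== PORT B =====
-- the backward early-exit search of Source B (the generator inside next)
def solAltGo (myString : String) (pat : String) : List Int → String
  | [] => ""   -- exhausted generator: Python raises StopIteration; excluded by Pre_solution
  | i :: rest =>
    match PySem.Str.pyGet? myString i with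
    | some c =>
        if PySem.Chars.isIn [c] pat.toList then PySem.Str.slice myString none (some (i + 1))
        else solAltGo myString pat rest
    | none => solAltGo myString pat rest                      -- unreachable: i is always in range

def solution_alt (myString : String) (pat : String) : String :=
  solAltGo myString pat (PySem.List.pyRange (PySem.Str.len myString - 1) (-1) (-1))

-- ===== PRECONDITION & SPEC =====
-- Pre_ excludes exactly the inputs where both Pythons raise (A: IndexError on end_num[-1],
-- B: StopIteration): no character of myString occurs in pat (incl. empty myString or pat).
def Pre_solution (myString : String) (pat : String) : Prop :=
  myString.toList.any (fun c => PySem.Chars.isIn [c] pat.toList) = true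
instance (myString : String) (pat : String) : Decidable (Pre_solution myString pat) := by
  unfold Pre_solution; infer_instance

def pvWitness_solution : String × String := ("abcde", "ce")

def Spec_solution (myString : String) (pat : String) (out : String) : Prop :=
  out = solution_alt myString pat
instance (myString : String) (pat : String) (out : String) : Decidable (Spec_solution myString pat out) := by
  unfold Spec_solution; infer_instance

-- ===== CLAIM (what is proved, stated in full; the proofs are below) =====
def Claim_equal_solution : Prop := ∀ (myString : String) (pat : String), Dom_solution myString pat → Pre_solution myString pat → Spec_solution myString pat (solution myString pat)

-- ===== LEMMAS AND PROOFS =====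

-- k-th position of s matches (the shared predicate, on Nat indices)
def matchPred (s pat : String) (k : Nat) : Bool :=
  (s.toList[k]?.map (fun c => PySem.Chars.isIn [c] pat.toList)).getD false

-- A's collected index list, characterised as a filtered range
lemma enum_filter (q : Char → Bool) (cs : List Char) (s0 : Int) :
    ((PySem.List.enumerate cs s0).filter (fun iv => q iv.2)).map (·.1)
      = ((List.range cs.length).filter (fun k => (cs[k]?.map q).getD false)).map
          (fun k : Nat => s0 + (k : Int)) := by
  induction cs generalizing s0 with
  | nil => simp [PySem.List.enumerate]
  | cons c cs ih =>
    rw [PySem.List.enumerate_cons]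
    simp only [List.length_cons, List.range_succ_eq_map, List.filter_cons,
      List.getElem?_cons_zero, Option.map_some, Option.getD_some, List.filter_map,
      Function.comp_def, List.getElem?_cons_succ]
    have hmaps : List.map (fun k : Nat => s0 + (k : Int)) (List.map Nat.succ
        (List.filter (fun x => (Option.map q cs[x]?).getD false) (List.range cs.length)))
        = List.map (fun k : Nat => (s0 + 1) + (k : Int))
          (List.filter (fun x => (Option.map q cs[x]?).getD false) (List.range cs.length)) := by
      rw [List.map_map]
      exact List.map_congr_left (fun k _ => by
        simp [Function.comp, Nat.succ_eq_add_one]; ring)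
    by_cases hq : q c = true
    · simp [hq, hmaps, ih (s0 + 1)]
    · simp [hq, hmaps, ih (s0 + 1)]

-- B's backward scan, characterised by the last element of the same filtered range
lemma goB_eq (s pat : String) (m : Nat) (hm : m ≤ s.toList.length) :
    solAltGo s pat (PySem.List.pyRange ((m : Int) - 1) (-1) (-1))
      = match ((List.range m).filter (matchPred s pat)).getLast? with
        | some k => PySem.Str.slice s none (some ((k : Int) + 1))
        | none => "" := by
  induction m with
  | zero =>
    rw [show ((0 : Nat) : Int) - 1 = -1 by ring, PySem.List.pyRange_neg_one_eq_nil le_rfl]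
    simp [solAltGo]
  | succ m ih =>
    have hm' : m ≤ s.toList.length := Nat.le_of_succ_le hm
    have hlt : m < s.toList.length := hm
    rw [show ((m + 1 : Nat) : Int) - 1 = (m : Int) by push_cast; ring,
        PySem.List.pyRange_neg_one_cons (by omega : (-1 : Int) < (m : Int))]
    obtain ⟨c, hc⟩ : ∃ c, s.toList[m]? = some c := ⟨s.toList[m], List.getElem?_eq_getElem hlt⟩
    simp only [solAltGo, PySem.Str.pyGet?_natCast, hc]
    have hpred : matchPred s pat m = PySem.Chars.isIn [c] pat.toList := by
      simp [matchPred, hc]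
    rw [List.range_succ, List.filter_append, List.filter_cons, List.filter_nil]
    by_cases hq : PySem.Chars.isIn [c] pat.toList = true
    · simp [hq, hpred]
    · rw [hpred, if_neg (by simp [hq])]
      simp only [hq, Bool.false_eq_true, if_false, List.append_nil]
      simpa using ih hm'

-- unconditional agreement of the two ports
lemma ports_agree (s pat : String) : solution s pat = solution_alt s pat := by
  have hA :
      (PySem.List.enumerate s.toList).foldl
          (fun acc iv => if PySem.Chars.isIn [iv.2] pat.toList then acc ++ [iv.1] else acc) []
        = ((List.range s.toList.length).filter (matchPred s pat)).map (fun k : Nat => (k : Int)) := by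
    rw [PySem.List.foldl_append_if
          (p := fun iv : Int × Char => PySem.Chars.isIn [iv.2] pat.toList)
          (f := fun iv : Int × Char => iv.1),
        List.nil_append,
        enum_filter (fun c => PySem.Chars.isIn [c] pat.toList) s.toList 0]
    simp only [zero_add]
    rfl
  have hB := goB_eq s pat s.toList.length le_rfl
  simp only [solution, solution_alt, PySem.Str.len_eq, hA, hB,
    PySem.List.pyGet?_neg_one, List.getLast?_map]
  cases ((List.range s.toList.length).filter (matchPred s pat)).getLast? <;> simp

-- ===== VERDICT (by name: the statement is the Claim_ definition above) =====
theorem solution_spec : Claim_equal_solution := by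
  intro s pat _ _
  unfold Spec_solution
  exact ports_agree s pat
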